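-- pv_equiv track=rewrite | github.com/pierrec/Cwerg | FrontEnd/typify.py | ComputeStringSize
-- ===== SOURCE A (Python) =====
-- def ComputeStringSize(strkind: str, string: str) -> int:
--     n = len(string)
--     if strkind == "raw":
--         return n
--     if strkind == "hex":
--         n = 0
--         last = None
--         for c in string:
--             if c in " \t\n":
--                 continue
--             if last:
--                 last = None
--             else:
--                 last = c
--                 n += 1
--         assert last == None
--         return n
--     esc = False
--     for c in string:
--         if esc:
--             esc = False
--             if c == "x":
--                 n -= 3
--             else:
--                 n -= 1
--         elif c == "\\":
--             esc = True
--     return n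
-- ===== SOURCE B (Python) =====
-- def ComputeStringSize(strkind: str, string: str) -> int:
--     if strkind == "raw":
--         return len(string)
--     if strkind == "hex":
--         m = sum(1 for c in string if c not in " \t\n")
--         assert m % 2 == 0
--         return m // 2
--     total = len(string)
--     i = string.find("\\")
--     while 0 <= i < len(string) - 1:
--         total -= 3 if string[i + 1] == "x" else 1
--         i = string.find("\\", i + 2)
--     return total
-- ===== Notes on version B (the rewrite author's own statement) =====
-- stated objective: idiomatic
-- what changed: hex branch replaces the last-char toggle loop by a count of non-whitespace chars divided by 2; default branch replaces the per-char esc flag by a str.find-based skip scan that jumps from backslash to backslash subtracting 3 for \x pairs and 1 otherwise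
-- outside the precondition, e.g. on ComputeStringSize('hex', 'abc'): A raises AssertionError, B raises AssertionError
import Mathlib
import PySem

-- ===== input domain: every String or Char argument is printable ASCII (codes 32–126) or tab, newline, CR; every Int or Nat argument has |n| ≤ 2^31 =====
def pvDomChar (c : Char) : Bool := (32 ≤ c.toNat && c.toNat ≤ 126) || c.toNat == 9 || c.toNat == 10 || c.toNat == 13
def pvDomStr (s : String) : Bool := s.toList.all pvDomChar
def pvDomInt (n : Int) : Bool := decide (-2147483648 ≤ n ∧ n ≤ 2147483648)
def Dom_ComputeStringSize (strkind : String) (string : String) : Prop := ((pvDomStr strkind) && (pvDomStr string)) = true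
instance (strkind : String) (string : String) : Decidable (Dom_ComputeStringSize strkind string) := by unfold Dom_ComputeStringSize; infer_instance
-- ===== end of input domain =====

-- B replaces A's char-by-char toggle/flag loops by a count-and-divide for hex and a
-- backslash-to-backslash skip scan for escapes (objective: idiomatic); equal return value on Pre_.

-- ===== PORT A =====
-- the hex-branch loop of A: state (last, n), processed left to right
def pvHexLoop : List Char → Option Char → Int → Option Char × Int
  | [], last, n => (last, n)
  | c :: rest, last, n =>
    if c = ' ' ∨ c = '\t' ∨ c = '\n' then pvHexLoop rest last n
    else match last with
      | some _ => pvHexLoop rest none n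
      | none => pvHexLoop rest (some c) (n + 1)

-- the default-branch loop of A: state (esc, n)
def pvEscLoop : List Char → Bool → Int → Int
  | [], _, n => n
  | c :: rest, esc, n =>
    if esc then
      if c = 'x' then pvEscLoop rest false (n - 3) else pvEscLoop rest false (n - 1)
    else if c = '\\' then pvEscLoop rest true n
    else pvEscLoop rest false n

def ComputeStringSize (strkind : String) (string : String) : Int :=
  let n : Int := string.toList.length
  if strkind = "raw" then n
  else if strkind = "hex" then
    -- `assert last == None` raises exactly when the non-whitespace count is odd: excluded by Pre_
    (pvHexLoop string.toList none 0).2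
  else pvEscLoop string.toList false n

-- ===== PORT B =====
-- the str.find-based while loop of Source B, ported as the equivalent structural recursion over the
-- suffix: each iteration lands on a '\\'; with a following char it subtracts 3 ('x') or 1 and
-- resumes after the pair; a trailing '\\' ends the loop (find index fails i < len-1); exact.
def pvPairScan : List Char → Int
  | [] => 0
  | c :: rest =>
    if c = '\\' then
      match rest with
      | [] => 0
      | d :: rest' => (if d = 'x' then 3 else 1) + pvPairScan rest'
    else pvPairScan rest

def ComputeStringSize_alt (strkind : String) (string : String) : Int :=
  if strkind = "raw" then (string.toList.length : Int)
  else if strkind = "hex" then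
    let m : Nat := (string.toList.filter (fun c => !(c == ' ' || c == '\t' || c == '\n'))).length
    PySem.Int.floordiv (m : Int) 2
  else (string.toList.length : Int) - pvPairScan string.toList

-- ===== PRECONDITION & SPEC =====
-- Pre_ excludes exactly the hex strings with an odd number of non-whitespace characters, on which
-- A's `assert last == None` raises AssertionError (B's assert raises there too).
def Pre_ComputeStringSize (strkind : String) (string : String) : Prop :=
  strkind = "hex" →
    (string.toList.filter (fun c => !(c == ' ' || c == '\t' || c == '\n'))).length % 2 = 0
instance (strkind : String) (string : String) : Decidable (Pre_ComputeStringSize strkind string) := by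
  unfold Pre_ComputeStringSize; infer_instance

def pvWitness_ComputeStringSize : String × String := ("hex", "a b\n cd")

def Spec_ComputeStringSize (strkind : String) (string : String) (out : Int) : Prop := out = ComputeStringSize_alt strkind string
instance (strkind : String) (string : String) (out : Int) : Decidable (Spec_ComputeStringSize strkind string out) := by unfold Spec_ComputeStringSize; infer_instance

-- ===== CLAIM (what is proved, stated in full; the proofs are below) =====
def Claim_equal_ComputeStringSize : Prop := ∀ (strkind : String) (string : String), Dom_ComputeStringSize strkind string → Pre_ComputeStringSize strkind string → Spec_ComputeStringSize strkind string (ComputeStringSize strkind string)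

-- ===== LEMMAS AND PROOFS =====

-- invariant of A's hex loop: with `last = none` it adds ⌈m/2⌉, with `last` set it adds ⌊m/2⌋,
-- where m counts the non-whitespace characters of the remaining list
lemma pvHexLoop_spec (l : List Char) : ∀ n : Int,
    (pvHexLoop l none n).2
      = n + (((l.filter (fun c => !(c == ' ' || c == '\t' || c == '\n'))).length + 1) / 2 : Nat)
    ∧ ∀ c, (pvHexLoop l (some c) n).2
      = n + (((l.filter (fun c => !(c == ' ' || c == '\t' || c == '\n'))).length) / 2 : Nat) := by
  induction l with
  | nil => intro n; simp [pvHexLoop]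
  | cons a rest ih =>
    intro n
    by_cases hws : a = ' ' ∨ a = '\t' ∨ a = '\n'
    · rcases hws with h | h | h <;>
        refine ⟨?_, fun c => ?_⟩ <;>
        simp [pvHexLoop, h, (ih n).1, (ih n).2]
    · have h := hws; push_neg at h
      obtain ⟨h1, h2, h3⟩ := h
      refine ⟨?_, fun c => ?_⟩
      · have hrec := (ih (n + 1)).2 a
        simp only [pvHexLoop, if_neg hws, hrec, List.filter_cons]
        simp only [h1, h2, h3, Bool.not_eq_true', Bool.or_eq_false_iff,
          beq_eq_false_iff_ne, ne_eq, not_false_eq_true, and_self, if_true, List.length_cons]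
        all_goals (push_cast; omega)
      · have hrec := (ih n).1
        simp only [pvHexLoop, if_neg hws, hrec, List.filter_cons]
        simp only [h1, h2, h3, Bool.not_eq_true', Bool.or_eq_false_iff,
          beq_eq_false_iff_ne, ne_eq, not_false_eq_true, and_self, if_true, List.length_cons]
        all_goals (push_cast; omega)

-- a non-backslash character contributes nothing to the pair scan
lemma pvPairScan_cons_ne (c : Char) (rest : List Char) (hc : c ≠ '\\') :
    pvPairScan (c :: rest) = pvPairScan rest := by
  cases rest <;> simp [pvPairScan, hc]

-- A's esc-flag loop (started with esc = false) subtracts exactly B's pair-scan total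
lemma pvEscLoop_eq (l : List Char) : ∀ n : Int, pvEscLoop l false n = n - pvPairScan l := by
  induction l using pvPairScan.induct with
  | case1 => intro n; simp [pvEscLoop, pvPairScan]
  | case2 => intro n; simp [pvEscLoop, pvPairScan]
  | case3 d rest' ih =>
    intro n
    by_cases hx : d = 'x' <;>
      simp [pvEscLoop, pvPairScan, hx, ih] <;> ring
  | case4 c rest hc ih =>
    intro n
    rw [pvPairScan_cons_ne c rest hc]
    simp [pvEscLoop, hc, ih]

-- ===== VERDICT (by name: the statement is the Claim_ definition above) =====
theorem ComputeStringSize_spec : Claim_equal_ComputeStringSize := by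
  intro strkind string _hdom hpre
  unfold Spec_ComputeStringSize ComputeStringSize ComputeStringSize_alt
  by_cases hraw : strkind = "raw"
  · simp [hraw]
  · by_cases hhex : strkind = "hex"
    · have hm := hpre hhex
      set m : Nat := (string.toList.filter (fun c => !(c == ' ' || c == '\t' || c == '\n'))).length with hmdef
      have hA := (pvHexLoop_spec string.toList 0).1
      simp only [hhex, if_pos, ← hmdef] at *
      rw [hA]
      have : PySem.Int.floordiv (m : Int) 2 = ((m / 2 : Nat) : Int) := by
        exact_mod_cast PySem.Int.floordiv_natCast m 2
      rw [this]
      have : (m + 1) / 2 = m / 2 := by omega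
      simp [this]
    · simp only [hraw, hhex, if_false]
      exact pvEscLoop_eq string.toList _
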